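-- pv_equiv track=rewrite | github.com/2445868686/DaVinci-AI-Tools | DaVinci-Sub-Translator/Sub AI Translator/Sub AI Translator 1.0.py | _build_parallel_curl_command
-- ===== SOURCE A (Python) =====
-- def _build_parallel_curl_command(artifacts, headers, timeout, limit):
--     parts = [
--         "curl",
--         "-sS",
--         "--show-error",
--         "--parallel",
--         "--parallel-immediate",
--         "--parallel-max",
--         str(limit),
--         "-m",
--         str(timeout),
--     ]
--     for idx, art in enumerate(artifacts):
--         method = art.get("method") or "POST"
--         parts.extend(["-X", method])
--         for header in headers or []:
--             parts.extend(["-H", header])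
--         payload = art.get("payload")
--         if payload:
--             parts.extend(["--data-binary", f"@{payload}"])
--         parts.extend(["-o", art["output"], art["url"]])
--         if idx < len(artifacts) - 1:
--             parts.append("--next")
--     return parts
-- ===== SOURCE B (Python) =====
-- def _build_parallel_curl_command(artifacts, headers, timeout, limit):
--     hdr = []
--     for h in headers or []:
--         hdr += ["-H", h]
--
--     def rest(arts):
--         # recursion on the artifact list: last segment gets no separator because
--         # its recursive remainder is empty
--         if not arts:
--             return []
--         art = arts[0]
--         seg = ["-X", art.get("method") or "POST"] + hdr
--         payload = art.get("payload")
--         if payload: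
--             seg += ["--data-binary", "@" + payload]
--         seg += ["-o", art["output"], art["url"]]
--         more = rest(arts[1:])
--         return seg + ([] if not more else ["--next"] + more)
--
--     return [
--         "curl",
--         "-sS",
--         "--show-error",
--         "--parallel",
--         "--parallel-immediate",
--         "--parallel-max",
--         str(limit),
--         "-m",
--         str(timeout),
--     ] + rest(list(artifacts))
-- ===== Notes on version B (the rewrite author's own statement) =====
-- stated objective: alternative
-- what changed: B replaces A's single accumulating loop with its index-versus-length trailing-separator guard by a structural recursion over the artifact list: each call builds its own segment and prepends '--next' to the recursive remainder only when that remainder is nonempty, with the header tokens computed once up front.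
import Mathlib
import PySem

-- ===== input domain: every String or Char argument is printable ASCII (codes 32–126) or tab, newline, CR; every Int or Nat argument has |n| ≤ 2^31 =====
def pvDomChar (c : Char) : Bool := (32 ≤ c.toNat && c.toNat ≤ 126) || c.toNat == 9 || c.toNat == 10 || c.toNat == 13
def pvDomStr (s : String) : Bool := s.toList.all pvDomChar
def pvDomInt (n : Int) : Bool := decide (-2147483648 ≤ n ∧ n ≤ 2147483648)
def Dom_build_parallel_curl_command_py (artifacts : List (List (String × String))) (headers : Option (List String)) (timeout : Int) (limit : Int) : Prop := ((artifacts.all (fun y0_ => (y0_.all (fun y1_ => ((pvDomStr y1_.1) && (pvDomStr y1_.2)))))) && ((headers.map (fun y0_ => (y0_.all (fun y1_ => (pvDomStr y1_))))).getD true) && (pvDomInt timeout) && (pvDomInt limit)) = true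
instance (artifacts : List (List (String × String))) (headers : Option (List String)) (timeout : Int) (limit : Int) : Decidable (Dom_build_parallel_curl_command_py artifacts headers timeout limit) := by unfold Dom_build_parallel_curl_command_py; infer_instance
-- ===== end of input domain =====

-- ===== PORT A =====
-- B rebuilds the same tokens by structural recursion over the artifacts ('--next'
-- prepended to a nonempty remainder) instead of A's indexed loop with a trailing-
-- separator guard. Pre_ excludes artifacts missing 'output' or 'url', where the
-- Python A (and B) raise KeyError.

-- dict.get / d[k] on a dict-as-association-list: first match (exact for Python dicts)
def pvGetStr (art : List (String × String)) (k : String) : Option String :=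
  List.lookup k art

def build_parallel_curl_command_py (artifacts : List (List (String × String))) (headers : Option (List String)) (timeout : Int) (limit : Int) : List String :=
  (PySem.List.enumerate artifacts 0).foldl
    (fun parts p =>
      let method := match pvGetStr p.2 "method" with
        | some m => if m = "" then "POST" else m
        | none => "POST"
      let parts := parts ++ ["-X", method]
      let parts := (headers.getD []).foldl (fun ps h => ps ++ ["-H", h]) parts
      let parts := match pvGetStr p.2 "payload" with
        | some pl => if pl = "" then parts else parts ++ ["--data-binary", "@" ++ pl]
        | none => parts
      let parts := parts ++ ["-o", (pvGetStr p.2 "output").getD "", (pvGetStr p.2 "url").getD ""]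
      if p.1 < (artifacts.length : Int) - 1 then parts ++ ["--next"] else parts)
    ["curl", "-sS", "--show-error", "--parallel", "--parallel-immediate",
     "--parallel-max", PySem.Int.toStr limit, "-m", PySem.Int.toStr timeout]

-- ===== PORT B =====
-- Source B's recursive helper rest(arts), with the precomputed header tokens hdr
def pvRestB (hdr : List String) : List (List (String × String)) → List String
  | [] => []
  | art :: arts =>
      let seg := ["-X", match pvGetStr art "method" with
        | some m => if m = "" then "POST" else m
        | none => "POST"] ++ hdr
      let seg := match pvGetStr art "payload" with
        | some pl => if pl = "" then seg else seg ++ ["--data-binary", "@" ++ pl]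
        | none => seg
      let seg := seg ++ ["-o", (pvGetStr art "output").getD "", (pvGetStr art "url").getD ""]
      let more := pvRestB hdr arts
      seg ++ (if more.isEmpty then [] else "--next" :: more)

def build_parallel_curl_command_py_alt (artifacts : List (List (String × String))) (headers : Option (List String)) (timeout : Int) (limit : Int) : List String :=
  let hdr := (headers.getD []).foldl (fun a h => a ++ ["-H", h]) []
  ["curl", "-sS", "--show-error", "--parallel", "--parallel-immediate",
   "--parallel-max", PySem.Int.toStr limit, "-m", PySem.Int.toStr timeout] ++
  pvRestB hdr artifacts

-- ===== PRECONDITION & SPEC =====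
-- Pre_ excludes exactly the artifacts on which A raises KeyError (missing 'output' or 'url')
def Pre_build_parallel_curl_command_py (artifacts : List (List (String × String))) (headers : Option (List String)) (timeout : Int) (limit : Int) : Prop :=
  artifacts.all (fun art => (pvGetStr art "output").isSome && (pvGetStr art "url").isSome) = true

instance (artifacts : List (List (String × String))) (headers : Option (List String)) (timeout : Int) (limit : Int) : Decidable (Pre_build_parallel_curl_command_py artifacts headers timeout limit) := by unfold Pre_build_parallel_curl_command_py; infer_instance

def pvWitness_build_parallel_curl_command_py : (List (List (String × String))) × Option (List String) × Int × Int :=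
  ([[("output", "o1"), ("url", "http://a")], [("method", "GET"), ("payload", "p"), ("output", "o2"), ("url", "http://b")]], some ["X-K: 1"], 30, 4)

def Spec_build_parallel_curl_command_py (artifacts : List (List (String × String))) (headers : Option (List String)) (timeout : Int) (limit : Int) (out : List String) : Prop := out = build_parallel_curl_command_py_alt artifacts headers timeout limit
instance (artifacts : List (List (String × String))) (headers : Option (List String)) (timeout : Int) (limit : Int) (out : List String) : Decidable (Spec_build_parallel_curl_command_py artifacts headers timeout limit out) := by unfold Spec_build_parallel_curl_command_py; infer_instance

-- ===== CLAIM (what is proved, stated in full; the proofs are below) =====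
def Claim_equal_build_parallel_curl_command_py : Prop := ∀ (artifacts : List (List (String × String))) (headers : Option (List String)) (timeout : Int) (limit : Int), Dom_build_parallel_curl_command_py artifacts headers timeout limit → Pre_build_parallel_curl_command_py artifacts headers timeout limit → Spec_build_parallel_curl_command_py artifacts headers timeout limit (build_parallel_curl_command_py artifacts headers timeout limit)

-- ===== LEMMAS AND PROOFS =====

-- the tokens one artifact contributes (shared shape of both programs' segment)
def pvSeg (hdr : List String) (art : List (String × String)) : List String :=
  let seg := ["-X", match pvGetStr art "method" with
    | some m => if m = "" then "POST" else m
    | none => "POST"] ++ hdr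
  let seg := match pvGetStr art "payload" with
    | some pl => if pl = "" then seg else seg ++ ["--data-binary", "@" ++ pl]
    | none => seg
  seg ++ ["-o", (pvGetStr art "output").getD "", (pvGetStr art "url").getD ""]

-- A's loop body, with the captured total length n made explicit
def pvStepA (headers : Option (List String)) (n : Int) (parts : List String) (p : Int × List (String × String)) : List String :=
  let method := match pvGetStr p.2 "method" with
    | some m => if m = "" then "POST" else m
    | none => "POST"
  let parts := parts ++ ["-X", method]
  let parts := (headers.getD []).foldl (fun ps h => ps ++ ["-H", h]) parts
  let parts := match pvGetStr p.2 "payload" with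
    | some pl => if pl = "" then parts else parts ++ ["--data-binary", "@" ++ pl]
    | none => parts
  let parts := parts ++ ["-o", (pvGetStr p.2 "output").getD "", (pvGetStr p.2 "url").getD ""]
  if p.1 < n - 1 then parts ++ ["--next"] else parts

lemma pvHdrFold (hs : List String) (acc : List String) :
    hs.foldl (fun ps h => ps ++ ["-H", h]) acc = acc ++ hs.flatMap (fun h => ["-H", h]) := by
  induction hs generalizing acc with
  | nil => simp
  | cons h t ih => simp [List.foldl_cons, ih]

lemma pvStepA_eq (headers : Option (List String)) (n k : Int) (acc : List String) (art : List (String × String)) :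
    pvStepA headers n acc (k, art) =
      (acc ++ pvSeg ((headers.getD []).flatMap (fun h => ["-H", h])) art) ++
        (if k < n - 1 then ["--next"] else []) := by
  simp only [pvStepA, pvSeg, pvHdrFold]
  cases pvGetStr art "payload" with
  | none => split <;> simp [List.append_assoc]
  | some pl =>
    by_cases hpl : pl = "" <;> simp [hpl, List.append_assoc] <;> split <;> simp [List.append_assoc]

lemma pvRestB_cons (hdr : List String) (art : List (String × String)) (arts : List (List (String × String))) :
    pvRestB hdr (art :: arts) =
      pvSeg hdr art ++ (if (pvRestB hdr arts).isEmpty then [] else "--next" :: pvRestB hdr arts) := by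
  simp [pvRestB, pvSeg]

lemma pvRestB_ne_nil (hdr : List String) (art : List (String × String)) (arts : List (List (String × String))) :
    pvRestB hdr (art :: arts) ≠ [] := by
  rw [pvRestB_cons]
  simp [pvSeg]

lemma pvLoopA (headers : Option (List String)) (n : Int) (l : List (List (String × String))) :
    ∀ (k : Int) (acc : List String), k + l.length = n →
    (PySem.List.enumerate l k).foldl (pvStepA headers n) acc =
      acc ++ pvRestB ((headers.getD []).flatMap (fun h => ["-H", h])) l := by
  induction l with
  | nil => intro k acc _; simp [PySem.List.enumerate_nil, pvRestB]
  | cons a r ih =>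
    intro k acc hn
    rw [PySem.List.enumerate_cons, List.foldl_cons, pvStepA_eq, pvRestB_cons]
    cases r with
    | nil =>
      have hk : ¬ k < n - 1 := by simp at hn; omega
      simp [hk, PySem.List.enumerate_nil, pvRestB]
    | cons b t =>
      have hk : k < n - 1 := by simp at hn; omega
      have hn' : (k + 1) + (b :: t).length = n := by simp at hn ⊢; omega
      rw [ih (k + 1) _ hn']
      have hne := pvRestB_ne_nil ((headers.getD []).flatMap (fun h => ["-H", h])) b t
      simp [hk, List.isEmpty_iff, hne, List.append_assoc]

-- ===== VERDICT (by name: the statement is the Claim_ definition above) =====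
theorem build_parallel_curl_command_py_spec : Claim_equal_build_parallel_curl_command_py := by
  intro artifacts headers timeout limit _ _
  unfold Spec_build_parallel_curl_command_py
  unfold build_parallel_curl_command_py build_parallel_curl_command_py_alt
  rw [show (fun (parts : List String) (p : Int × List (String × String)) =>
      let method := match pvGetStr p.2 "method" with
        | some m => if m = "" then "POST" else m
        | none => "POST"
      let parts := parts ++ ["-X", method]
      let parts := (headers.getD []).foldl (fun ps h => ps ++ ["-H", h]) parts
      let parts := match pvGetStr p.2 "payload" with
        | some pl => if pl = "" then parts else parts ++ ["--data-binary", "@" ++ pl]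
        | none => parts
      let parts := parts ++ ["-o", (pvGetStr p.2 "output").getD "", (pvGetStr p.2 "url").getD ""]
      if p.1 < (artifacts.length : Int) - 1 then parts ++ ["--next"] else parts)
      = pvStepA headers (artifacts.length : Int) from rfl]
  rw [pvLoopA headers (artifacts.length : Int) artifacts 0 _ (by simp)]
  rw [pvHdrFold]
  rfl
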